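-- pv_equiv track=rewrite | github.com/Osg523/coding_practiceOsg | 프로그래머스/0/120843. 공 던지기/공 던지기.py | solution
-- ===== SOURCE A (Python) =====
-- def solution(numbers, k):
--     answer = 0
--     i = 0
--
--     while k - 1> 0:
--         k -= 1
--         if i + 2 > len(numbers):
--             i = i + 2 - len(numbers)
--         else:
--             i += 2
--     return numbers[i]
-- ===== SOURCE B (Python) =====
-- def solution(numbers, k):
--     steps = max(k - 1, 0)
--     return numbers[(2 * steps) % len(numbers)]
-- ===== Notes on version B (the rewrite author's own statement) =====
-- stated objective: faster
-- what changed: Replaces the k-step wrapping while-loop with a single modular-arithmetic index computation numbers[(2*max(k-1,0)) % len(numbers)].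
-- crash fix: When numbers is non-empty, k >= 2 and len(numbers) divides 2*(k-1), A's wrap index lands on len(numbers) and A raises IndexError, while B returns the intended wrapped value numbers[0]. — e.g. on solution([10, 20], 2): A raises IndexError, B returns 10
import Mathlib
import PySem

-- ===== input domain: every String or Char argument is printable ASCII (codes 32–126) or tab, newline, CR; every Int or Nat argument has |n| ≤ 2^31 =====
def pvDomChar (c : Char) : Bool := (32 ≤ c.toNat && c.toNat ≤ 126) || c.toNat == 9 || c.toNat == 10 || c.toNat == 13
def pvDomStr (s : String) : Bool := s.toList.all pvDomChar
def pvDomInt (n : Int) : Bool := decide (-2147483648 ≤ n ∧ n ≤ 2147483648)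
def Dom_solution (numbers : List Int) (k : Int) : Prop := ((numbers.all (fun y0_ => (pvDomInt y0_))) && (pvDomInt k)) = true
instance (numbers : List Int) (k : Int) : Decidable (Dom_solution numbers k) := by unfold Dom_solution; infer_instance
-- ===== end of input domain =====

-- B replaces A's k-step wrapping while-loop by one modular index computation (O(k) -> O(1)).


-- ===== PORT A =====
-- the 'while k - 1 > 0' loop of A, step for step (state: k and i)
def solutionLoop (len : Int) (k : Int) (i : Int) : Int :=
  if k - 1 > 0 then
    solutionLoop len (k - 1) (if i + 2 > len then i + 2 - len else i + 2)
  else i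
termination_by (k - 1).toNat
decreasing_by omega

def solution (numbers : List Int) (k : Int) : Int :=
  (PySem.List.pyGet? numbers (solutionLoop (numbers.length : Int) k 0)).getD 0

-- ===== PORT B =====
def solution_alt (numbers : List Int) (k : Int) : Int :=
  let steps : Int := max (k - 1) 0
  (PySem.List.pyGet? numbers (PySem.Int.mod (2 * steps) (numbers.length : Int))).getD 0

-- ===== PRECONDITION & SPEC =====
-- Pre_ excludes exactly the inputs on which A raises IndexError: the empty list, and the
-- inputs where A's wrap index lands on len(numbers) (k ≥ 2 with len(numbers) dividing 2*(k-1)).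
def Pre_solution (numbers : List Int) (k : Int) : Prop :=
  numbers ≠ [] ∧ (k ≤ 1 ∨ ¬ ((numbers.length : Int) ∣ 2 * (k - 1)))
instance (numbers : List Int) (k : Int) : Decidable (Pre_solution numbers k) := by
  unfold Pre_solution; infer_instance
def pvWitness_solution : List Int × Int := ([10, 20, 30], 2)

-- When numbers is non-empty, k ≥ 2 and len(numbers) divides 2*(k-1), A raises IndexError
-- (its wrap index lands on len(numbers)); B returns the intended wrapped value numbers[0].
def Raises_solution (numbers : List Int) (k : Int) : Prop :=
  numbers ≠ [] ∧ 2 ≤ k ∧ ((numbers.length : Int) ∣ 2 * (k - 1))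
instance (numbers : List Int) (k : Int) : Decidable (Raises_solution numbers k) := by
  unfold Raises_solution; infer_instance
def pvRaiseWitness_solution : List Int × Int := ([10, 20], 2)
def pvRaiseWitnessOut_solution : Int := 10

def Spec_solution (numbers : List Int) (k : Int) (out : Int) : Prop := out = solution_alt numbers k
instance (numbers : List Int) (k : Int) (out : Int) : Decidable (Spec_solution numbers k out) := by unfold Spec_solution; infer_instance

-- ===== CLAIM (what is proved, stated in full; the proofs are below) =====
def Claim_equal_solution : Prop := ∀ (numbers : List Int) (k : Int), Dom_solution numbers k → Pre_solution numbers k → Spec_solution numbers k (solution numbers k)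
def Claim_raises_solution : Prop := (∀ (numbers : List Int) (k : Int), Dom_solution numbers k → Raises_solution numbers k → ¬ Pre_solution numbers k) ∧ (Dom_solution (pvRaiseWitness_solution.1) (pvRaiseWitness_solution.2) ∧ Raises_solution (pvRaiseWitness_solution.1) (pvRaiseWitness_solution.2) ∧ solution_alt (pvRaiseWitness_solution.1) (pvRaiseWitness_solution.2) = pvRaiseWitnessOut_solution)

-- ===== LEMMAS AND PROOFS =====

-- loop invariant: for 3 ≤ n, starting from 0 ≤ i ≤ n, after ≥ 1 iteration the result r
-- satisfies 1 ≤ r ≤ n and r ≡ i + 2*(k-1) (mod n)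
lemma solutionLoop_inv (n : Int) (hn : 3 ≤ n) :
    ∀ (m : Nat) (k i : Int), (k - 1).toNat = m → 0 ≤ i → i ≤ n → 0 < k - 1 →
      1 ≤ solutionLoop n k i ∧ solutionLoop n k i ≤ n ∧
        (solutionLoop n k i) % n = (i + 2 * (k - 1)) % n := by
  intro m
  induction m using Nat.strong_induction_on with
  | _ m ih =>
    intro k i hm h0 hle hk
    rw [solutionLoop]
    simp only [hk, if_pos]
    set j : Int := if i + 2 > n then i + 2 - n else i + 2 with hj
    have hj0 : 1 ≤ j := by simp only [hj]; split_ifs <;> omega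
    have hjn : j ≤ n := by simp only [hj]; split_ifs <;> omega
    have hjmod : j % n = (i + 2) % n := by
      simp only [hj]; split_ifs with h
      · exact Int.sub_emod_right (i + 2) n
      · rfl
    by_cases hk2 : 0 < k - 1 - 1
    · have := ih ((k - 1 - 1).toNat) (by omega) (k - 1) j (rfl) (by omega) hjn hk2
      refine ⟨this.1, this.2.1, ?_⟩
      rw [this.2.2]
      have : (j + 2 * (k - 1 - 1)) % n = (i + 2 + 2 * (k - 1 - 1)) % n := by
        conv_lhs => rw [Int.add_emod, hjmod, ← Int.add_emod]
      rw [this]; ring_nf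
    · rw [solutionLoop, if_neg hk2]
      have hk1 : k - 1 = 1 := by omega
      refine ⟨hj0, hjn, ?_⟩
      rw [hjmod, hk1]; ring_nf

-- ===== VERDICT (by name: the statement is the Claim_ definition above) =====
theorem solution_spec : Claim_equal_solution := by
  intro numbers k _ hpre
  obtain ⟨hne, hcase⟩ := hpre
  unfold Spec_solution solution solution_alt
  have hn0 : 0 < (numbers.length : Int) := by
    cases numbers with
    | nil => exact absurd rfl hne
    | cons a l => exact_mod_cast Nat.succ_pos l.length
  set n : Int := (numbers.length : Int)
  by_cases hk : k ≤ 1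
  · -- loop does not run; steps = 0, both index 0
    have hl : solutionLoop n k 0 = 0 := by rw [solutionLoop]; simp; omega
    have hs : max (k - 1) 0 = 0 := by omega
    rw [hl]
    simp only [hs, mul_zero]
    have : PySem.Int.mod 0 n = 0 := by
      rw [PySem.Int.mod_eq_emod_of_pos hn0]; simp
    rw [this]
  · -- k ≥ 2: A returns under Pre_ only if n does not divide 2*(k-1), forcing n ≥ 3
    have hdvd : ¬ (n ∣ 2 * (k - 1)) := by
      rcases hcase with h | h
      · omega
      · exact h
    have hn3 : 3 ≤ n := by
      by_contra h
      apply hdvd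
      interval_cases n
      · exact ⟨2 * (k - 1), by ring⟩
      · exact ⟨k - 1, by ring⟩
    have := solutionLoop_inv n hn3 (k - 1).toNat k 0 rfl le_rfl (by omega) (by omega)
    obtain ⟨h1, h2, h3⟩ := this
    set r := solutionLoop n k 0
    have hmne : (2 * (k - 1)) % n ≠ 0 := by
      intro h
      exact hdvd (Int.dvd_of_emod_eq_zero h)
    have hrn : r ≠ n := by
      intro h
      rw [h, Int.emod_self] at h3
      simp at h3
      exact hmne h3.symm
    have hr : r = (2 * (k - 1)) % n := by
      have hrlt : r < n := lt_of_le_of_ne h2 hrn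
      rw [← Int.emod_eq_of_lt (by omega : (0:Int) ≤ r) hrlt, h3]
      ring_nf
    have hsteps : max (k - 1) 0 = k - 1 := by omega
    rw [hr, hsteps]
    simp only [PySem.Int.mod_eq_emod_of_pos hn0]

theorem solution_raises : Claim_raises_solution := by
  unfold Claim_raises_solution
  constructor
  · intro numbers k _ ⟨hne, hk, hdvd⟩ ⟨_, hcase⟩
    rcases hcase with h | h
    · omega
    · exact h hdvd
  · exact ⟨by decide, ⟨by decide, by decide, by decide⟩, by decide⟩

-- self-check: the raise-witness value claimed above is exactly what B's port returns there
theorem solution_raises_witness_ok :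
    solution_alt pvRaiseWitness_solution.1 pvRaiseWitness_solution.2 = pvRaiseWitnessOut_solution :=
  solution_raises.2.2.2
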